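-- pv_equiv track=rewrite | github.com/gjalt-h/BScAI_thesis2022_usefulness_stereotypes | usefulness_groups.py | unique_att_grouped_counted
-- ===== SOURCE A (Python) =====
-- def unique_att_grouped_useful(iteration):
--     att_groups = [[] for _ in range(3)]
--     for alien in iteration:
--         for attribute in alien:
--             if attribute < 16:
--                 att_groups[0].append(attribute)
--             elif attribute < 32:
--                 att_groups[1].append(attribute)
--             else:
--                 att_groups[2].append(attribute)
--     return att_groups
--
-- def unique_att_grouped_sequence(sequence):
--     att_grouped = [[] for _ in range(3)]
--     for iteration in sequence:
--         it_grouped = unique_att_grouped_useful(iteration)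
--         for i in range(3):
--             att_grouped[i].append(it_grouped[i])
--     return att_grouped
--
-- def unique_att_grouped_counted(sequence):
--     att_grouped = unique_att_grouped_sequence(sequence)
--     groups_counted = [[] for _ in range(3)]
--     for i in range(3):
--         counters = []
--         for iteration in att_grouped[i]:
--             counters.append(len(set(iteration)))
--         groups_counted[i] = counters
--     return groups_counted
-- ===== SOURCE B (Python) =====
-- def unique_att_grouped_counted(sequence):
--     r0, r1, r2 = [], [], []
--     for iteration in sequence:
--         b0, b1, b2 = set(), set(), set()
--         for alien in iteration:
--             for attribute in alien:
--                 if attribute < 16: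
--                     b0.add(attribute)
--                 elif attribute < 32:
--                     b1.add(attribute)
--                 else:
--                     b2.add(attribute)
--         r0.append(len(b0))
--         r1.append(len(b1))
--         r2.append(len(b2))
--     return [r0, r1, r2]
-- ===== Notes on version B (the rewrite author's own statement) =====
-- stated objective: simpler
-- what changed: Fused A's three-stage pipeline (bucket each iteration into three lists, assemble three lists-of-lists, then count distinct elements per sublist) into one pass that maintains three sets per iteration and appends their sizes directly, with no intermediate nested lists.
import Mathlib
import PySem

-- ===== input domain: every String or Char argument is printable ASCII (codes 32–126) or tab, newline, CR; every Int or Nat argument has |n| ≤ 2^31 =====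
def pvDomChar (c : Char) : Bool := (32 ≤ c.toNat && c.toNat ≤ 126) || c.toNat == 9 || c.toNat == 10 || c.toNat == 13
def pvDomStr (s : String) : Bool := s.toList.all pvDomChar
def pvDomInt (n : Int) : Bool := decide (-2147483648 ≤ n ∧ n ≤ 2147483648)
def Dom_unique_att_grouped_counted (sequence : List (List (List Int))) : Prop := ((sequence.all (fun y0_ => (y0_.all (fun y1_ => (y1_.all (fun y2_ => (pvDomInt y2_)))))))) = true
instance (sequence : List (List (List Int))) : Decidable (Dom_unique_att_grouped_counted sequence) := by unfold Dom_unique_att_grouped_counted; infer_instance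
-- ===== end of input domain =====

-- B fuses A's three-stage pipeline (bucket lists per iteration, assemble lists-of-lists,
-- count distinct per sublist) into one pass keeping three sets per iteration (objective: simpler).

-- ===== PORT A =====
-- att_groups as a triple of the three bucket lists
def uagUseful (iteration : List (List Int)) : List Int × List Int × List Int :=
  iteration.foldl (fun g alien =>
    alien.foldl (fun g att =>
      if att < 16 then (g.1 ++ [att], g.2.1, g.2.2)
      else if att < 32 then (g.1, g.2.1 ++ [att], g.2.2)
      else (g.1, g.2.1, g.2.2 ++ [att])) g) ([], [], [])

def uagSequence (sequence : List (List (List Int))) :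
    List (List Int) × List (List Int) × List (List Int) :=
  sequence.foldl (fun acc iteration =>
    let it := uagUseful iteration
    (acc.1 ++ [it.1], acc.2.1 ++ [it.2.1], acc.2.2 ++ [it.2.2])) ([], [], [])

def unique_att_grouped_counted (sequence : List (List (List Int))) : List (List Int) :=
  let ag := uagSequence sequence
  [ ag.1.foldl (fun cs it => cs ++ [PySem.Set.len (PySem.Set.ofList it)]) [],
    ag.2.1.foldl (fun cs it => cs ++ [PySem.Set.len (PySem.Set.ofList it)]) [],
    ag.2.2.foldl (fun cs it => cs ++ [PySem.Set.len (PySem.Set.ofList it)]) [] ]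

-- ===== PORT B =====
def uagAltSets (iteration : List (List Int)) :
    PySem.Set Int × PySem.Set Int × PySem.Set Int :=
  iteration.foldl (fun b alien =>
    alien.foldl (fun b att =>
      if att < 16 then (PySem.Set.add b.1 att, b.2.1, b.2.2)
      else if att < 32 then (b.1, PySem.Set.add b.2.1 att, b.2.2)
      else (b.1, b.2.1, PySem.Set.add b.2.2 att)) b) (PySem.Set.empty, PySem.Set.empty, PySem.Set.empty)

def unique_att_grouped_counted_alt (sequence : List (List (List Int))) : List (List Int) :=
  let r := sequence.foldl (fun r iteration =>
    let b := uagAltSets iteration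
    (r.1 ++ [PySem.Set.len b.1], r.2.1 ++ [PySem.Set.len b.2.1], r.2.2 ++ [PySem.Set.len b.2.2]))
    ([], [], [])
  [r.1, r.2.1, r.2.2]

-- ===== PRECONDITION & SPEC =====
def Spec_unique_att_grouped_counted (sequence : List (List (List Int))) (out : List (List Int)) : Prop := out = unique_att_grouped_counted_alt sequence
instance (sequence : List (List (List Int))) (out : List (List Int)) : Decidable (Spec_unique_att_grouped_counted sequence out) := by unfold Spec_unique_att_grouped_counted; infer_instance

-- ===== CLAIM (what is proved, stated in full; the proofs are below) =====
def Claim_equal_unique_att_grouped_counted : Prop := ∀ (sequence : List (List (List Int))), Dom_unique_att_grouped_counted sequence → Spec_unique_att_grouped_counted sequence (unique_att_grouped_counted sequence)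

-- ===== LEMMAS AND PROOFS =====

def pvP0 (a : Int) : Bool := a < 16
def pvP1 (a : Int) : Bool := !(a < 16) && a < 32
def pvP2 (a : Int) : Bool := !(a < 16) && !(a < 32)

-- the flattened bucket lists of one iteration
def pvBuckets (iteration : List (List Int)) : List Int × List Int × List Int :=
  ((iteration.flatMap id).filter pvP0,
   (iteration.flatMap id).filter pvP1,
   (iteration.flatMap id).filter pvP2)

theorem uagUseful_inner (alien : List Int) (g : List Int × List Int × List Int) :
    alien.foldl (fun g att =>
      if att < 16 then (g.1 ++ [att], g.2.1, g.2.2)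
      else if att < 32 then (g.1, g.2.1 ++ [att], g.2.2)
      else (g.1, g.2.1, g.2.2 ++ [att])) g
    = (g.1 ++ alien.filter pvP0, g.2.1 ++ alien.filter pvP1, g.2.2 ++ alien.filter pvP2) := by
  induction alien generalizing g with
  | nil => simp
  | cons a t ih =>
    simp only [List.foldl_cons, List.filter_cons, pvP0, pvP1, pvP2]
    by_cases h0 : a < 16
    · simp [h0, ih]
    · by_cases h1 : a < 32 <;> simp [h0, h1, ih]

theorem uagUseful_eq (iteration : List (List Int)) :
    uagUseful iteration = pvBuckets iteration := by
  unfold uagUseful pvBuckets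
  suffices h : ∀ g : List Int × List Int × List Int,
      iteration.foldl (fun g alien =>
        alien.foldl (fun g att =>
          if att < 16 then (g.1 ++ [att], g.2.1, g.2.2)
          else if att < 32 then (g.1, g.2.1 ++ [att], g.2.2)
          else (g.1, g.2.1, g.2.2 ++ [att])) g) g
      = (g.1 ++ (iteration.flatMap id).filter pvP0,
         g.2.1 ++ (iteration.flatMap id).filter pvP1,
         g.2.2 ++ (iteration.flatMap id).filter pvP2) by
    simpa using h ([], [], [])
  induction iteration with
  | nil => intro g; simp
  | cons al t ih =>
    intro g
    rw [List.foldl_cons, uagUseful_inner, ih]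
    simp

theorem uagAltSets_inner (alien : List Int) (b : PySem.Set Int × PySem.Set Int × PySem.Set Int) :
    alien.foldl (fun b att =>
      if att < 16 then (PySem.Set.add b.1 att, b.2.1, b.2.2)
      else if att < 32 then (b.1, PySem.Set.add b.2.1 att, b.2.2)
      else (b.1, b.2.1, PySem.Set.add b.2.2 att)) b
    = (PySem.Set.update b.1 (alien.filter pvP0),
       PySem.Set.update b.2.1 (alien.filter pvP1),
       PySem.Set.update b.2.2 (alien.filter pvP2)) := by
  induction alien generalizing b with
  | nil => simp [PySem.Set.update]
  | cons a t ih =>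
    simp only [List.foldl_cons, List.filter_cons, pvP0, pvP1, pvP2]
    by_cases h0 : a < 16
    · simp [h0, ih, PySem.Set.update]
    · by_cases h1 : a < 32 <;> simp [h0, h1, ih, PySem.Set.update]

theorem uagAltSets_eq (iteration : List (List Int)) :
    uagAltSets iteration =
      (PySem.Set.ofList (pvBuckets iteration).1,
       PySem.Set.ofList (pvBuckets iteration).2.1,
       PySem.Set.ofList (pvBuckets iteration).2.2) := by
  unfold uagAltSets pvBuckets
  suffices h : ∀ b : PySem.Set Int × PySem.Set Int × PySem.Set Int,
      iteration.foldl (fun b alien =>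
        alien.foldl (fun b att =>
          if att < 16 then (PySem.Set.add b.1 att, b.2.1, b.2.2)
          else if att < 32 then (b.1, PySem.Set.add b.2.1 att, b.2.2)
          else (b.1, b.2.1, PySem.Set.add b.2.2 att)) b) b
      = (PySem.Set.update b.1 ((iteration.flatMap id).filter pvP0),
         PySem.Set.update b.2.1 ((iteration.flatMap id).filter pvP1),
         PySem.Set.update b.2.2 ((iteration.flatMap id).filter pvP2)) by
    simpa [PySem.Set.update_nil_left] using h (PySem.Set.empty, PySem.Set.empty, PySem.Set.empty)
  induction iteration with
  | nil => intro b; simp [PySem.Set.update]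
  | cons al t ih =>
    intro b
    rw [List.foldl_cons, uagAltSets_inner, ih]
    simp [PySem.Set.update, List.foldl_append]

-- the per-iteration count triple both sides compute
def pvCounts (iteration : List (List Int)) : Int × Int × Int :=
  (PySem.Set.len (PySem.Set.ofList (pvBuckets iteration).1),
   PySem.Set.len (PySem.Set.ofList (pvBuckets iteration).2.1),
   PySem.Set.len (PySem.Set.ofList (pvBuckets iteration).2.2))

theorem uagSequence_eq (sequence : List (List (List Int))) :
    uagSequence sequence =
      (sequence.map (fun it => (pvBuckets it).1),
       sequence.map (fun it => (pvBuckets it).2.1),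
       sequence.map (fun it => (pvBuckets it).2.2)) := by
  unfold uagSequence
  suffices h : ∀ acc : List (List Int) × List (List Int) × List (List Int),
      sequence.foldl (fun acc iteration =>
        let it := uagUseful iteration
        (acc.1 ++ [it.1], acc.2.1 ++ [it.2.1], acc.2.2 ++ [it.2.2])) acc
      = (acc.1 ++ sequence.map (fun it => (pvBuckets it).1),
         acc.2.1 ++ sequence.map (fun it => (pvBuckets it).2.1),
         acc.2.2 ++ sequence.map (fun it => (pvBuckets it).2.2)) by
    simpa using h ([], [], [])
  induction sequence with
  | nil => intro acc; simp
  | cons it t ih => intro acc; rw [List.foldl_cons, ih]; simp [uagUseful_eq]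

theorem alt_fold (sequence : List (List (List Int))) (r : List Int × List Int × List Int) :
    sequence.foldl (fun r iteration =>
        let b := uagAltSets iteration
        (r.1 ++ [PySem.Set.len b.1], r.2.1 ++ [PySem.Set.len b.2.1], r.2.2 ++ [PySem.Set.len b.2.2])) r
      = (r.1 ++ sequence.map (fun it => (pvCounts it).1),
         r.2.1 ++ sequence.map (fun it => (pvCounts it).2.1),
         r.2.2 ++ sequence.map (fun it => (pvCounts it).2.2)) := by
  induction sequence generalizing r with
  | nil => simp
  | cons it t ih => rw [List.foldl_cons, ih]; simp [uagAltSets_eq, pvCounts]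

theorem alt_eq_map (sequence : List (List (List Int))) :
    unique_att_grouped_counted_alt sequence =
      [sequence.map (fun it => (pvCounts it).1),
       sequence.map (fun it => (pvCounts it).2.1),
       sequence.map (fun it => (pvCounts it).2.2)] := by
  unfold unique_att_grouped_counted_alt
  rw [alt_fold]
  simp

-- ===== VERDICT (by name: the statement is the Claim_ definition above) =====
theorem unique_att_grouped_counted_spec : Claim_equal_unique_att_grouped_counted := by
  intro sequence _
  unfold Spec_unique_att_grouped_counted unique_att_grouped_counted
  rw [alt_eq_map, uagSequence_eq]
  simp only [PySem.List.foldl_append_singleton_eq_map]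
  simp [pvCounts, Function.comp]
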